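-- pv_equiv track=rewrite | github.com/cornell-colab/txt-group | generative_poetry/gen_poetry.py | generate_words_by_pos
-- ===== SOURCE A (Python) =====
-- def generate_words_by_pos(tidy_tagged_tokens):
--     # create a new dictionary to store lists of words, arranged by POS
--     words_by_post = {}
--     for token in tidy_tagged_tokens:
--         word = token[0]
--         pos = token[1]
--
--         # if this is the first time we're seeing a specific POS, create new list with one item, our current word
--         if pos not in words_by_post:
--             words_by_post[pos] = [word]
--         else:
--             # otherwise, add the current word to our growing list for that POS
--             words_by_post[pos].append(word)
--
--     return words_by_post
-- ===== SOURCE B (Python) =====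
-- def generate_words_by_pos(tidy_tagged_tokens):
--     # distinct POS tags in first-appearance order, then one filtering pass per tag
--     ordered_pos = list(dict.fromkeys(pos for _word, pos in tidy_tagged_tokens))
--     return {pos: [word for word, p in tidy_tagged_tokens if p == pos]
--             for pos in ordered_pos}
-- ===== Notes on version B (the rewrite author's own statement) =====
-- stated objective: alternative
-- what changed: Replaces the on-the-fly dict aggregation (create-or-append per token) with a two-phase pass: first collect the distinct POS tags in first-appearance order via dict.fromkeys, then build each tag's word list by filtering the whole token list once per tag.
import Mathlib
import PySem

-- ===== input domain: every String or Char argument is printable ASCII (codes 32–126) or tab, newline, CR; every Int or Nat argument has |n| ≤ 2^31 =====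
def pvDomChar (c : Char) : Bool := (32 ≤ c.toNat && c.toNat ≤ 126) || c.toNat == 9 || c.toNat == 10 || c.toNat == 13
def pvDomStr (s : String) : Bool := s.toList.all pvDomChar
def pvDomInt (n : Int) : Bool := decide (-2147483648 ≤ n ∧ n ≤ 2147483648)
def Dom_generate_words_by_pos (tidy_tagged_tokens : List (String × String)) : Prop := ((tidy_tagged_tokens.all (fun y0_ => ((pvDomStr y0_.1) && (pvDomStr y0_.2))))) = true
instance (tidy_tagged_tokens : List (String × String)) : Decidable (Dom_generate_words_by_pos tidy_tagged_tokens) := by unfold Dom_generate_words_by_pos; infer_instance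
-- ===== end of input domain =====

-- B builds the result as (distinct POS tags in first-appearance order) + one filter pass per
-- tag, instead of A's single-pass create-or-append dict aggregation; alternative decomposition.
-- ===== PORT A =====
def generate_words_by_pos (tidy_tagged_tokens : List (String × String)) : List (String × List String) :=
  (tidy_tagged_tokens.foldl
    (fun words_by_post token =>
      let word := token.1
      let pos := token.2
      if words_by_post.contains pos = false then
        words_by_post.insert pos [word]
      else
        words_by_post.modify pos [] (fun l => l ++ [word]))
    PySem.Dict.empty).items

-- ===== PORT B =====
def generate_words_by_pos_alt (tidy_tagged_tokens : List (String × String)) : List (String × List String) :=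
  let ordered_pos := PySem.List.dedup (tidy_tagged_tokens.map (fun t => t.2))
  ordered_pos.map (fun pos =>
    (pos, (tidy_tagged_tokens.filter (fun t => t.2 == pos)).map (fun t => t.1)))

-- ===== PRECONDITION & SPEC =====
def Spec_generate_words_by_pos (tidy_tagged_tokens : List (String × String)) (out : List (String × List String)) : Prop := out = generate_words_by_pos_alt tidy_tagged_tokens
instance (tidy_tagged_tokens : List (String × String)) (out : List (String × List String)) : Decidable (Spec_generate_words_by_pos tidy_tagged_tokens out) := by unfold Spec_generate_words_by_pos; infer_instance

-- ===== CLAIM (what is proved, stated in full; the proofs are below) =====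
def Claim_equal_generate_words_by_pos : Prop := ∀ (tidy_tagged_tokens : List (String × String)), Dom_generate_words_by_pos tidy_tagged_tokens → Spec_generate_words_by_pos tidy_tagged_tokens (generate_words_by_pos tidy_tagged_tokens)

-- ===== LEMMAS AND PROOFS =====

-- ===== VERDICT (by name: the statement is the Claim_ definition above) =====
-- A's branch (insert fresh key / modify existing key) is exactly dict-assignment d[pos] = d.get(pos, []) + [word]
lemma stepA_eq_modify (d : PySem.Dict String (List String)) (t : String × String) :
    (if d.contains t.2 = false then d.insert t.2 [t.1]
     else d.modify t.2 [] (fun l => l ++ [t.1]))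
    = d.modify t.2 [] (fun l => l ++ [t.1]) := by
  by_cases h : d.contains t.2 = false
  · simp [h, PySem.Dict.modify, PySem.Dict.getD_of_not_contains d _ h]
  · simp [h]

-- with Nodup keys, a dict's items are its keys paired with their looked-up values
lemma items_eq_map_keys (d : PySem.Dict String (List String)) (h : d.keys.Nodup) :
    d.items = d.keys.map (fun k => (k, d.getD k [])) := by
  simp only [PySem.Dict.keys, List.map_map]
  conv_lhs => rw [← List.map_id d.items]
  apply List.map_congr_left
  intro p hp
  have := PySem.Dict.getD_of_mem_items d (k := p.1) (v := p.2) (by simpa using hp) h []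
  simp [Function.comp, this]

theorem generate_words_by_pos_spec : Claim_equal_generate_words_by_pos := by
  intro ts _
  unfold Spec_generate_words_by_pos generate_words_by_pos generate_words_by_pos_alt
  have hstep : (fun (d : PySem.Dict String (List String)) (t : String × String) =>
      if d.contains t.2 = false then d.insert t.2 [t.1]
      else d.modify t.2 [] (fun l => l ++ [t.1]))
      = fun d t => d.modify t.2 [] (fun l => l ++ [t.1]) := by
    funext d t; exact stepA_eq_modify d t
  show (ts.foldl (fun d t =>
      if d.contains t.2 = false then d.insert t.2 [t.1]
      else d.modify t.2 [] (fun l => l ++ [t.1])) PySem.Dict.empty).items = _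
  rw [hstep]
  have hnodup : (ts.foldl (fun d t => d.modify t.2 [] (fun l => l ++ [t.1]))
      (PySem.Dict.empty : PySem.Dict String (List String))).keys.Nodup := by
    exact PySem.Dict.nodup_keys_foldl_modify_key ts (fun t => t.2) []
      (fun _ t => fun l => l ++ [t.1]) PySem.Dict.empty (by simp)
  have hkeys : (ts.foldl (fun d t => d.modify t.2 [] (fun l => l ++ [t.1]))
      (PySem.Dict.empty : PySem.Dict String (List String))).keys
      = PySem.Set.ofList (ts.map (fun t => t.2)) := by
    rw [PySem.Dict.keys_foldl_modify_key ts (fun t => t.2) []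
      (fun _ t => fun l => l ++ [t.1]) PySem.Dict.empty]
    simp [PySem.Set.update, PySem.Set.ofList_eq_foldl]
  have hgetD : ∀ c, (ts.foldl (fun d t => d.modify t.2 [] (fun l => l ++ [t.1]))
      (PySem.Dict.empty : PySem.Dict String (List String))).getD c []
      = (ts.filter (fun t => t.2 == c)).map (fun t => t.1) := by
    intro c
    have hm : ts.foldl (fun d t => d.modify t.2 [] (fun l => l ++ [t.1]))
        (PySem.Dict.empty : PySem.Dict String (List String))
        = (ts.map (fun t => (t.2, t.1))).foldl
            (fun d p => d.modify p.1 [] (fun l => l ++ [p.2])) PySem.Dict.empty := by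
      rw [List.foldl_map]
    rw [hm, PySem.Dict.getD_foldl_modify_append]
    simp [List.filter_map, List.map_map, Function.comp_def]
  rw [items_eq_map_keys _ hnodup, hkeys]
  simp only [PySem.List.dedup_eq_ofList]
  apply List.map_congr_left
  intro k _
  rw [hgetD k]
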